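-- pv_equiv track=rewrite | github.com/QuBenhao/LeetCode | problems/problems_2156/solution.py | subStrHash
-- ===== SOURCE A (Python) =====
-- def subStrHash(s: str, power: int, modulo: int, k: int, hashValue: int) -> str:
--     def f(ch):
--         return ord(ch) - ord("a") + 1
--     S = sum(f(ch) * power ** mi for mi, ch in enumerate(s[:k]))
--     if S % modulo == hashValue: return s[:k]
--     for i in range(k, len(s)):
--         S = (S - f(s[i-k])) // power + f(s[i]) * power ** (k-1)
--         if S % modulo == hashValue:
--             return s[i-k+1:i+1]
-- ===== SOURCE B (Python) =====
-- def subStrHash(s: str, power: int, modulo: int, k: int, hashValue: int) -> str: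
--     # Right-to-left Rabin-Karp: keep the hash of the length-k window starting at i
--     # reduced mod modulo; pow(power, k, modulo) is precomputed, each step is O(1).
--     n = len(s)
--     pk = pow(power, k, modulo)
--     h = 0
--     best = None
--     for i in range(n - 1, -1, -1):
--         h = (power * h + ord(s[i]) - 96
--              - (pk * (ord(s[i + k]) - 96) if i + k < n else 0)) % modulo
--         if i + k <= n and h == hashValue:
--             best = i
--     return s[best:best + k] if best is not None else None
-- ===== Notes on version B (the rewrite author's own statement) =====
-- stated objective: faster
-- what changed: A recomputes big-integer window hashes with power**(k-1) and an exact floor division at every step (O(n*k) bignum work); B makes one natural right-to-left pass keeping the window hash reduced mod modulo with pow(power,k,modulo) precomputed, so each step is O(1) modular arithmetic. Pre_ excludes modulo=0 and (power=0 with k<len(s)), where A raises ZeroDivisionError, and k<1, where A's power**(k-1) is float arithmetic with negative-index wraparound.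
-- intended difference: When k exceeds len(s) and the polynomial hash of the whole (too-short) string matches hashValue, A returns the truncated slice s[:k] = s, which is not a length-k substring; B returns None, the intended answer since no substring of length k exists. — e.g. on subStrHash("a", 2, 5, 2, 1): A returns some "a", B returns none
-- outside the precondition, e.g. on subStrHash('ab', 2, 0, 1, 0): A raises ZeroDivisionError, B raises ValueError; on subStrHash('abc', 0, 7, 2, 3): A raises ZeroDivisionError, B returns None; on subStrHash('bbc', 3, 5, -1, 3): A returns 'bb', B returns None
import Mathlib
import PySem

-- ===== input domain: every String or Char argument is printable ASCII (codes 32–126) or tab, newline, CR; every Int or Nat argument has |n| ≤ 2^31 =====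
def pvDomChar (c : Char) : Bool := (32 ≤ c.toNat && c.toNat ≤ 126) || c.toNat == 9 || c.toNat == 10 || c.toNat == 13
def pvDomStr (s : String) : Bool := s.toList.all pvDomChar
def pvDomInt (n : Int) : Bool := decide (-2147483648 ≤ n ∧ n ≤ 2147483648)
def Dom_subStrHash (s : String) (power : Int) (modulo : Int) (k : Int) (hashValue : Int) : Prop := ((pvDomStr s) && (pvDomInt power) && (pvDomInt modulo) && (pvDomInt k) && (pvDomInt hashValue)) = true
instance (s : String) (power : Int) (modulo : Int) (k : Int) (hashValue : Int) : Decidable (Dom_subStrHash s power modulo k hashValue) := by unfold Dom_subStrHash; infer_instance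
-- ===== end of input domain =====

-- B replaces A's per-step big-integer power**(k-1) / exact-division rolling update by one
-- right-to-left pass in modular arithmetic with pow(power,k,modulo) precomputed (objective: faster).

-- ===== PORT A =====
def pvF (c : Char) : Int := (c.toNat : Int) - 97 + 1   -- ord(ch) - ord('a') + 1

-- the for-loop of A: fuel = number of remaining iterations, i = current Python index, S = running hash
def pvALoop (cs : List Char) (power modulo k hashValue : Int) : Nat → Int → Int → Option String
  | 0, _, _ => none
  | c + 1, i, S =>
    let S' := PySem.Int.floordiv (S - pvF (PySem.List.pyGetD cs (i - k) ' ')) power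
              + pvF (PySem.List.pyGetD cs i ' ') * power ^ (k - 1).toNat
    if PySem.Int.mod S' modulo = hashValue then
      some (String.ofList (PySem.List.slice cs (some (i - k + 1)) (some (i + 1))))
    else
      pvALoop cs power modulo k hashValue c (i + 1) S'

def subStrHash (s : String) (power : Int) (modulo : Int) (k : Int) (hashValue : Int) : Option String :=
  let cs := s.toList
  let pref := PySem.List.slice cs none (some k)
  let S := (PySem.List.enumerate pref).foldl (fun acc q => acc + pvF q.2 * power ^ q.1.toNat) 0
  if PySem.Int.mod S modulo = hashValue then some (String.ofList pref)
  else pvALoop cs power modulo k hashValue ((cs.length : Int) - k).toNat k S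

-- ===== PORT B =====
def pvG (c : Char) : Int := (c.toNat : Int) - 96   -- ord(ch) - 96

-- the for-loop of B over i = n-1, …, 0: fuel j+1 means current index is j; carries (h, best)
def pvBLoop (cs : List Char) (power modulo k hashValue pk : Int) : Nat → Int → Option Int → Option Int
  | 0, _, best => best
  | j + 1, h, best =>
    let i : Int := (j : Int)
    let h' := PySem.Int.mod (power * h + pvG (PySem.List.pyGetD cs i ' ')
        - (if i + k < (cs.length : Int) then pk * pvG (PySem.List.pyGetD cs (i + k) ' ') else 0)) modulo
    let best' := if i + k ≤ (cs.length : Int) ∧ h' = hashValue then some i else best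
    pvBLoop cs power modulo k hashValue pk j h' best'

def subStrHash_alt (s : String) (power : Int) (modulo : Int) (k : Int) (hashValue : Int) : Option String :=
  let cs := s.toList
  let pk := PySem.Int.powMod power k.toNat modulo
  match pvBLoop cs power modulo k hashValue pk cs.length 0 none with
  | some i => some (String.ofList (PySem.List.slice cs (some i) (some (i + k))))
  | none => none

-- ===== PRECONDITION & SPEC =====
-- polynomial hash of the input string (used only by D_ below): sum of (ord(c)-96) * power^position
def pvDHash (p : Int) (l : List Char) : Int := l.foldr (fun c a => ((c.toNat : Int) - 96) + p * a) 0

-- Pre_ excludes: modulo = 0 (A raises ZeroDivisionError); power = 0 while the loop runs (A raises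
-- ZeroDivisionError unless k ≥ len(s)); and k ≤ 0, where A evaluates power**(k-1) with a negative
-- exponent (float arithmetic / ValueError) and B's pow(power, k, modulo) raises for most inputs.
def Pre_subStrHash (s : String) (power : Int) (modulo : Int) (k : Int) (hashValue : Int) : Prop :=
  modulo ≠ 0 ∧ 1 ≤ k ∧ (power ≠ 0 ∨ (s.toList.length : Int) ≤ k)
instance (s : String) (power : Int) (modulo : Int) (k : Int) (hashValue : Int) : Decidable (Pre_subStrHash s power modulo k hashValue) := by unfold Pre_subStrHash; infer_instance

def pvWitness_subStrHash : String × Int × Int × Int × Int := ("abc", 2, 7, 2, 0)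

-- When k exceeds len(s) and the polynomial hash of the whole (too-short) string matches hashValue,
-- A returns the truncated slice s[:k] = s, which is not a length-k substring; B returns none, the
-- intended answer since no substring of length k exists.
def D_subStrHash (s : String) (power : Int) (modulo : Int) (k : Int) (hashValue : Int) : Prop :=
  (s.toList.length : Int) < k ∧ PySem.Int.mod (pvDHash power s.toList) modulo = hashValue
instance (s : String) (power : Int) (modulo : Int) (k : Int) (hashValue : Int) : Decidable (D_subStrHash s power modulo k hashValue) := by unfold D_subStrHash; infer_instance

def Spec_subStrHash (s : String) (power : Int) (modulo : Int) (k : Int) (hashValue : Int) (out : Option String) : Prop := ¬ D_subStrHash s power modulo k hashValue → out = subStrHash_alt s power modulo k hashValue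
instance (s : String) (power : Int) (modulo : Int) (k : Int) (hashValue : Int) (out : Option String) : Decidable (Spec_subStrHash s power modulo k hashValue out) := by unfold Spec_subStrHash; infer_instance

def pvDiffWitness_subStrHash : String × Int × Int × Int × Int := ("a", 2, 5, 2, 1)
def pvDiffWitnessOut_subStrHash : (Option String) × (Option String) := (some "a", none)

-- ===== CLAIM (what is proved, stated in full; the proofs are below) =====
def Claim_unchanged_subStrHash : Prop := ∀ (s : String) (power : Int) (modulo : Int) (k : Int) (hashValue : Int), Dom_subStrHash s power modulo k hashValue → Pre_subStrHash s power modulo k hashValue → Spec_subStrHash s power modulo k hashValue (subStrHash s power modulo k hashValue)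
def Claim_changed_subStrHash : Prop := Dom_subStrHash (pvDiffWitness_subStrHash.1) (pvDiffWitness_subStrHash.2.1) (pvDiffWitness_subStrHash.2.2.1) (pvDiffWitness_subStrHash.2.2.2.1) (pvDiffWitness_subStrHash.2.2.2.2) ∧ Pre_subStrHash (pvDiffWitness_subStrHash.1) (pvDiffWitness_subStrHash.2.1) (pvDiffWitness_subStrHash.2.2.1) (pvDiffWitness_subStrHash.2.2.2.1) (pvDiffWitness_subStrHash.2.2.2.2) ∧ D_subStrHash (pvDiffWitness_subStrHash.1) (pvDiffWitness_subStrHash.2.1) (pvDiffWitness_subStrHash.2.2.1) (pvDiffWitness_subStrHash.2.2.2.1) (pvDiffWitness_subStrHash.2.2.2.2) ∧ subStrHash (pvDiffWitness_subStrHash.1) (pvDiffWitness_subStrHash.2.1) (pvDiffWitness_subStrHash.2.2.1) (pvDiffWitness_subStrHash.2.2.2.1) (pvDiffWitness_subStrHash.2.2.2.2) = pvDiffWitnessOut_subStrHash.1 ∧ subStrHash_alt (pvDiffWitness_subStrHash.1) (pvDiffWitness_subStrHash.2.1) (pvDiffWitness_subStrHash.2.2.1) (pvDiffWitness_subStrHash.2.2.2.1)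 (pvDiffWitness_subStrHash.2.2.2.2) = pvDiffWitnessOut_subStrHash.2 ∧ pvDiffWitnessOut_subStrHash.1 ≠ pvDiffWitnessOut_subStrHash.2
def Claim_exact_subStrHash : Prop := ∀ (s : String) (power : Int) (modulo : Int) (k : Int) (hashValue : Int), Dom_subStrHash s power modulo k hashValue → Pre_subStrHash s power modulo k hashValue → D_subStrHash s power modulo k hashValue → subStrHash s power modulo k hashValue ≠ subStrHash_alt s power modulo k hashValue

-- ===== LEMMAS AND PROOFS =====

-- exact polynomial hash of a character list, written with pvF (equal to pvDHash)
def pvHash (p : Int) (l : List Char) : Int := l.foldr (fun c a => pvF c + p * a) 0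

theorem pvDHash_eq (p : Int) (l : List Char) : pvDHash p l = pvHash p l := by
  induction l with
  | nil => rfl
  | cons c t ih => simp only [pvDHash, pvHash, List.foldr_cons] at *; rw [ih]; unfold pvF; ring_nf

-- exact hash of the window of length k' starting at i
def pvW (cs : List Char) (p : Int) (k' : Nat) (i : Nat) : Int := pvHash p ((cs.drop i).take k')

theorem pvG_eq (c : Char) : pvG c = pvF c := by unfold pvG pvF; omega

theorem pvModSub (a m : Int) : m ∣ PySem.Int.mod a m - a := by
  have h := PySem.Int.floordiv_mul_add_mod a m
  exact ⟨-(PySem.Int.floordiv a m), by linarith [h]⟩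

theorem pvModCongr (m a b : Int) (hm : m ≠ 0) (h : m ∣ a - b) :
    PySem.Int.mod a m = PySem.Int.mod b m := by
  have ha := PySem.Int.floordiv_mul_add_mod a m
  have hb := PySem.Int.floordiv_mul_add_mod b m
  obtain ⟨t, ht⟩ := h
  have hd : PySem.Int.mod a m - PySem.Int.mod b m
      = m * (t - PySem.Int.floordiv a m + PySem.Int.floordiv b m) := by
    linear_combination ht + ha - hb
  have hdvd : |m| ∣ PySem.Int.mod a m - PySem.Int.mod b m :=
    (abs_dvd _ _).mpr ⟨_, hd⟩
  have habs : |PySem.Int.mod a m - PySem.Int.mod b m| < |m| := by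
    rcases lt_trichotomy 0 m with hm0 | hm0 | hm0
    · have b1 := PySem.Int.mod_nonneg a hm0
      have b2 := PySem.Int.mod_lt a hm0
      have b3 := PySem.Int.mod_nonneg b hm0
      have b4 := PySem.Int.mod_lt b hm0
      rw [abs_of_pos hm0, abs_lt]; omega
    · exact absurd hm0.symm hm
    · have b1 := PySem.Int.mod_neg_bounds a hm0
      have b2 := PySem.Int.mod_neg_bounds b hm0
      rw [abs_of_neg hm0, abs_lt]; omega
  have := Int.eq_zero_of_abs_lt_dvd hdvd habs
  linarith

theorem pvMod_zero (m : Int) : PySem.Int.mod 0 m = 0 :=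
  (PySem.Int.mod_eq_zero_iff_dvd 0 m).mpr (dvd_zero m)

theorem pvFdivCancel (p x : Int) (hp : p ≠ 0) : PySem.Int.floordiv (p * x) p = x := by
  simp [PySem.Int.floordiv, Int.mul_fdiv_cancel_left x hp]

theorem pvEnumFold (p : Int) (l : List Char) (s : Nat) (A : Int) :
    (PySem.List.enumerate l (s : Int)).foldl (fun acc q => acc + pvF q.2 * p ^ q.1.toNat) A
      = A + p ^ s * pvHash p l := by
  induction l generalizing s A with
  | nil => simp [PySem.List.enumerate, pvHash]
  | cons c t ih =>
    rw [PySem.List.enumerate_cons]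
    have : ((s : Int) + 1) = ((s + 1 : Nat) : Int) := by push_cast; ring
    rw [List.foldl_cons, this, ih]
    simp only [pvHash, List.foldr_cons, Int.toNat_natCast]
    ring

theorem pvHash_append (p : Int) (l : List Char) (c : Char) :
    pvHash p (l ++ [c]) = pvHash p l + p ^ l.length * pvF c := by
  induction l with
  | nil => simp [pvHash]
  | cons d t ih =>
    simp only [pvHash, List.cons_append, List.foldr_cons] at *
    rw [ih]; simp [pow_succ]; ring

theorem pvW_stop (cs : List Char) (p : Int) (k' i : Nat) (h : cs.length ≤ i) :
    pvW cs p k' i = 0 := by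
  unfold pvW
  rw [List.drop_eq_nil_of_le h]
  simp [pvHash]

theorem pvW_head (cs : List Char) (p : Int) (k' i : Nat) (hk : 1 ≤ k') (hi : i < cs.length) :
    pvW cs p k' i = pvF cs[i] + p * pvHash p ((cs.drop (i + 1)).take (k' - 1)) := by
  obtain ⟨k'', rfl⟩ : ∃ k'', k' = k'' + 1 := ⟨k' - 1, by omega⟩
  unfold pvW
  rw [List.drop_eq_getElem_cons hi, List.take_succ_cons]
  simp [pvHash]

theorem pvW_tail (cs : List Char) (p : Int) (kk i : Nat) (hk : 1 ≤ kk) (h : i + kk < cs.length) :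
    pvW cs p kk (i + 1) = pvHash p ((cs.drop (i + 1)).take (kk - 1)) + p ^ (kk - 1) * pvF (cs.getD (i + kk) ' ') := by
  obtain ⟨k2, rfl⟩ : ∃ k2, kk = k2 + 1 := ⟨kk - 1, by omega⟩
  unfold pvW
  have hlen : k2 < (cs.drop (i + 1)).length := by
    rw [List.length_drop]; omega
  have hlt : i + 1 + k2 < cs.length := by omega
  have hget : (cs.drop (i + 1))[k2]? = some (cs.getD (i + (k2 + 1)) ' ') := by
    rw [List.getElem?_eq_getElem hlen]
    rw [show i + (k2 + 1) = i + 1 + k2 from by omega]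
    rw [List.getD_eq_getElem cs ' ' hlt]
    rw [List.getElem_drop]
  rw [List.take_add_one, hget]
  simp only [Option.toList_some]
  rw [pvHash_append p ((cs.drop (i + 1)).take k2) (cs.getD (i + (k2 + 1)) ' ')]
  rw [List.length_take_of_le (by rw [List.length_drop]; omega)]
  simp

theorem pvW_step (cs : List Char) (p : Int) (kk i : Nat) (hk : 1 ≤ kk) (hi : i < cs.length) :
    pvW cs p kk i = pvF (cs.getD i ' ') + p * pvW cs p kk (i + 1)
      - (if i + kk < cs.length then p ^ kk * pvF (cs.getD (i + kk) ' ') else 0) := by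
  have hgi : cs.getD i ' ' = cs[i] := List.getD_eq_getElem cs ' ' hi
  by_cases h : i + kk < cs.length
  · rw [pvW_head cs p kk i hk hi, pvW_tail cs p kk i hk h]
    simp only [h, if_pos, hgi]
    have hp : p ^ kk = p * p ^ (kk - 1) := by
      conv_lhs => rw [show kk = (kk - 1) + 1 by omega]
      rw [pow_succ]; ring
    rw [hp]; ring
  · rw [pvW_head cs p kk i hk hi]
    simp only [h, if_neg, not_false_iff, hgi]
    have : (cs.drop (i + 1)).take (kk - 1) = (cs.drop (i + 1)).take kk := by
      rw [List.take_of_length_le, List.take_of_length_le] <;> rw [List.length_drop] <;> omega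
    unfold pvW
    rw [this]; ring

theorem pvA_step (cs : List Char) (p : Int) (kk w : Nat) (hp : p ≠ 0) (hk : 1 ≤ kk)
    (h : w + kk < cs.length) :
    PySem.Int.floordiv (pvW cs p kk w - pvF (cs.getD w ' ')) p + pvF (cs.getD (w + kk) ' ') * p ^ (kk - 1)
      = pvW cs p kk (w + 1) := by
  have hgw : cs.getD w ' ' = cs[w]'(by omega) := List.getD_eq_getElem cs ' ' (by omega)
  rw [pvW_head cs p kk w hk (by omega), pvW_tail cs p kk w hk h, hgw]
  have : pvF (cs[w]'(by omega)) + p * pvHash p ((cs.drop (w + 1)).take (kk - 1)) - pvF (cs[w]'(by omega))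
      = p * pvHash p ((cs.drop (w + 1)).take (kk - 1)) := by ring
  rw [this, pvFdivCancel _ _ hp]
  ring

theorem pvFind_congr {α : Type} (l : List α) (P Q : α → Bool) (h : ∀ x ∈ l, P x = Q x) :
    l.find? P = l.find? Q := by
  induction l with
  | nil => rfl
  | cons a t ih =>
    have ha := h a (by simp)
    simp only [List.find?_cons, ha]
    cases hq : Q a with
    | true => rfl
    | false => exact ih (fun x hx => h x (by simp [hx]))

-- reference result: index of the first window whose hash matches
def pvR (cs : List Char) (p m hv : Int) (k' : Nat) : Option Nat :=
  (List.range ((cs.length - k') + 1)).find? (fun w => PySem.Int.mod (pvW cs p k' w) m == hv)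

theorem pvALoop_eq (cs : List Char) (p m k hv : Int) (hp : p ≠ 0) (hk : 1 ≤ k)
    (c w : Nat) (hc : w + k.toNat + c = cs.length) :
    pvALoop cs p m k hv c ((w + k.toNat : Nat) : Int) (pvW cs p k.toNat w)
      = ((List.range' (w + 1) c).find? (fun v => PySem.Int.mod (pvW cs p k.toNat v) m == hv)).map
          (fun v => String.ofList ((cs.drop v).take k.toNat)) := by
  induction c generalizing w with
  | zero => simp [pvALoop]
  | succ c ih =>
    have hwk : w + k.toNat < cs.length := by omega
    have e1 : ((w + k.toNat : Nat) : Int) - k = ((w : Nat) : Int) := by push_cast; omega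
    have e4 : (k - 1).toNat = k.toNat - 1 := by omega
    unfold pvALoop
    simp only [e1, e4, PySem.List.pyGetD_natCast]
    rw [pvA_step cs p k.toNat w hp (by omega) hwk]
    rw [List.range'_succ, List.find?_cons]
    by_cases hmatch : PySem.Int.mod (pvW cs p k.toNat (w + 1)) m = hv
    · simp only [hmatch, if_pos, beq_self_eq_true, Option.map_some]
      congr 2
      have ea : ((w : Nat) : Int) + 1 = ((w + 1 : Nat) : Int) := by push_cast; ring
      have eb : ((w + k.toNat : Nat) : Int) + 1 = ((w + 1 : Nat) : Int) + ((k.toNat : Nat) : Int) := by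
        push_cast; omega
      rw [ea, eb, PySem.List.slice_natCast_add]
    · have hbeq : (PySem.Int.mod (pvW cs p k.toNat (w + 1)) m == hv) = false := by
        simp [hmatch]
      simp only [hmatch, if_neg, not_false_iff, hbeq]
      have ec : ((w + k.toNat : Nat) : Int) + 1 = (((w + 1) + k.toNat : Nat) : Int) := by push_cast; omega
      rw [ec, ih (w + 1) (by omega)]

theorem pvA_eq (s : String) (p m k hv : Int) (hm : m ≠ 0) (hk : 1 ≤ k)
    (hp : p ≠ 0 ∨ (s.toList.length : Int) ≤ k) :
    subStrHash s p m k hv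
      = (pvR s.toList p m hv k.toNat).map (fun w => String.ofList ((s.toList.drop w).take k.toNat)) := by
  simp only [subStrHash]
  rw [PySem.List.slice_to s.toList (by omega : (0 : Int) ≤ k)]
  have hS : (PySem.List.enumerate (s.toList.take k.toNat)).foldl
      (fun acc q => acc + pvF q.2 * p ^ q.1.toNat) 0 = pvW s.toList p k.toNat 0 := by
    have := pvEnumFold p (s.toList.take k.toNat) 0 0
    simpa [pvW] using this
  rw [hS]
  unfold pvR
  rw [List.range_eq_range', List.range'_succ, List.find?_cons]
  by_cases h0 : PySem.Int.mod (pvW s.toList p k.toNat 0) m = hv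
  · have hbeq : (PySem.Int.mod (pvW s.toList p k.toNat 0) m == hv) = true := by simp [h0]
    rw [hbeq, if_pos h0]
    simp [pvW]
  · have hbeq : (PySem.Int.mod (pvW s.toList p k.toNat 0) m == hv) = false := by simp [h0]
    rw [hbeq, if_neg h0]
    by_cases hkn : k.toNat < s.toList.length
    · have hp' : p ≠ 0 := by
        rcases hp with h | h
        · exact h
        · omega
      have hfuel : ((s.toList.length : Int) - k).toNat = s.toList.length - k.toNat := by omega
      have halt := pvALoop_eq s.toList p m k hv hp' hk (s.toList.length - k.toNat) 0 (by omega)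
      have hz : ((0 + k.toNat : Nat) : Int) = k := by omega
      rw [hz] at halt
      rw [hfuel, halt]
    · have h1 : ((s.toList.length : Int) - k).toNat = 0 := by omega
      have h2 : s.toList.length - k.toNat = 0 := by omega
      rw [h1, h2]
      simp [pvALoop]

-- B-side predicate: the check B performs at index i
def pvPB (cs : List Char) (m k hv : Int) (p : Int) (k' : Nat) (i : Nat) : Bool :=
  decide ((((i : Nat) : Int) + k ≤ (cs.length : Int))
    ∧ PySem.Int.mod (pvW cs p k' i) m = hv)

theorem pvBLoop_eq (cs : List Char) (p m k hv pk : Int) (hm : m ≠ 0) (hk : 1 ≤ k)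
    (hpk : pk = PySem.Int.mod (p ^ k.toNat) m)
    (j : Nat) (hj : j ≤ cs.length) (best : Option Int) :
    pvBLoop cs p m k hv pk j (PySem.Int.mod (pvW cs p k.toNat j) m) best
      = (((List.range j).find? (pvPB cs m k hv p k.toNat)).map (fun i => ((i : Nat) : Int))).or best := by
  induction j generalizing best with
  | zero => simp [pvBLoop]
  | succ j ih =>
    have hjlt : j < cs.length := by omega
    simp only [pvBLoop]
    have hlt : ((j : Nat) : Int) < (cs.length : Int) := by exact_mod_cast hjlt
    have hstep : PySem.Int.mod (p * PySem.Int.mod (pvW cs p k.toNat (j + 1)) m + pvG (PySem.List.pyGetD cs ((j : Nat) : Int) ' ')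
          - (if ((j : Nat) : Int) + k < (cs.length : Int) then pk * pvG (PySem.List.pyGetD cs (((j : Nat) : Int) + k) ' ') else 0)) m
        = PySem.Int.mod (pvW cs p k.toNat j) m := by
      simp only [PySem.List.pyGetD_natCast, pvG_eq]
      by_cases hin : j + k.toNat < cs.length
      · have hin' : ((j : Nat) : Int) + k < (cs.length : Int) := by omega
        have e3 : ((j : Nat) : Int) + k = ((j + k.toNat : Nat) : Int) := by omega
        rw [if_pos hin', e3, PySem.List.pyGetD_natCast]
        apply pvModCongr m _ _ hm
        rw [pvW_step cs p k.toNat j (by omega) hjlt]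
        simp only [hin, if_pos]
        have d1 : m ∣ p * (PySem.Int.mod (pvW cs p k.toNat (j + 1)) m - pvW cs p k.toNat (j + 1)) :=
          Dvd.dvd.mul_left (pvModSub _ m) p
        have d2 : m ∣ (PySem.Int.mod (p ^ k.toNat) m - p ^ k.toNat) * pvF (cs.getD (j + k.toNat) ' ') :=
          Dvd.dvd.mul_right (pvModSub _ m) _
        have hsub := dvd_sub d1 d2
        rw [hpk]
        convert hsub using 1
        ring
      · have hin' : ¬ (((j : Nat) : Int) + k < (cs.length : Int)) := by omega
        rw [if_neg hin']
        apply pvModCongr m _ _ hm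
        rw [pvW_step cs p k.toNat j (by omega) hjlt]
        simp only [hin, if_neg, not_false_iff]
        have d1 : m ∣ p * (PySem.Int.mod (pvW cs p k.toNat (j + 1)) m - pvW cs p k.toNat (j + 1)) :=
          Dvd.dvd.mul_left (pvModSub _ m) p
        convert d1 using 1
        ring
    rw [hstep, ih hjlt.le]
    have hbest' : (if ((((j : Nat) : Int) + k ≤ (cs.length : Int))
        ∧ PySem.Int.mod (pvW cs p k.toNat j) m = hv) then some ((j : Nat) : Int) else best)
        = (if pvPB cs m k hv p k.toNat j then some ((j : Nat) : Int) else best) := by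
      unfold pvPB
      split_ifs with h1 h2 h2 <;> simp_all
    rw [hbest']
    rw [List.range_succ, List.find?_append]
    cases hfind : (List.range j).find? (pvPB cs m k hv p k.toNat) with
    | some a => simp [Option.or]
    | none =>
      simp only [List.find?_singleton, Option.none_or, Option.map_none]
      cases hPBj : pvPB cs m k hv p k.toNat j with
      | true => simp [Option.or]
      | false => simp

theorem pvB_char (s : String) (p m k hv : Int) (hm : m ≠ 0) (hk : 1 ≤ k) :
    subStrHash_alt s p m k hv
      = (((List.range s.toList.length).find? (pvPB s.toList m k hv p k.toNat)).map
          (fun i => String.ofList ((s.toList.drop i).take k.toNat))) := by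
  simp only [subStrHash_alt]
  set cs := s.toList with hcs
  have hpk : PySem.Int.powMod p k.toNat m = PySem.Int.mod (p ^ k.toNat) m := by
    simp [PySem.Int.powMod]
  have hinit : (0 : Int) = PySem.Int.mod (pvW cs p k.toNat cs.length) m := by
    rw [pvW_stop cs p k.toNat cs.length le_rfl, pvMod_zero]
  rw [hinit, hpk, pvBLoop_eq cs p m k hv _ hm hk rfl cs.length le_rfl none]
  cases hres : (List.range cs.length).find? (pvPB cs m k hv p k.toNat) with
  | none => simp
  | some w =>
    simp only [Option.map_some, Option.some_or]
    have hsl : PySem.List.slice cs (some ((w : Nat) : Int)) (some (((w : Nat) : Int) + k)) = (cs.drop w).take k.toNat := by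
      rw [show ((w : Nat) : Int) + k = ((w : Nat) : Int) + ((k.toNat : Nat) : Int) from by omega]
      rw [PySem.List.slice_natCast_add]
    rw [hsl]

theorem pvB_eq (s : String) (p m k hv : Int) (hm : m ≠ 0) (hk : 1 ≤ k)
    (hkn : k ≤ (s.toList.length : Int)) :
    subStrHash_alt s p m k hv
      = (pvR s.toList p m hv k.toNat).map (fun w => String.ofList ((s.toList.drop w).take k.toNat)) := by
  rw [pvB_char s p m k hv hm hk]
  set cs := s.toList with hcs
  set n := cs.length with hn
  have hk1 : 1 ≤ k.toNat := by omega
  have hkle : k.toNat ≤ n := by omega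
  have hsplit : List.range n = List.range ((n - k.toNat) + 1) ++ List.range' ((n - k.toNat) + 1) (n - ((n - k.toNat) + 1)) := by
    have hgen : ∀ a b : Nat, List.range (a + b) = List.range a ++ List.range' a b := by
      intro a b
      rw [List.range_eq_range', List.range_eq_range']
      have := (List.range'_append (s := 0) (m := a) (n := b) (step := 1))
      simpa using this.symm
    have h := hgen ((n - k.toNat) + 1) (n - ((n - k.toNat) + 1))
    rw [show ((n - k.toNat) + 1) + (n - ((n - k.toNat) + 1)) = n from by omega] at h
    exact h
  have hfind : (List.range n).find? (pvPB cs m k hv p k.toNat)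
      = (List.range ((n - k.toNat) + 1)).find? (fun w => PySem.Int.mod (pvW cs p k.toNat w) m == hv) := by
    rw [hsplit, List.find?_append]
    have htail : (List.range' ((n - k.toNat) + 1) (n - ((n - k.toNat) + 1))).find? (pvPB cs m k hv p k.toNat) = none := by
      rw [List.find?_eq_none]
      intro x hx
      rw [List.mem_range'] at hx
      obtain ⟨i, hi, rfl⟩ := hx
      unfold pvPB
      simp only [decide_eq_true_eq]
      intro hcon
      have := hcon.1
      omega
    rw [htail, Option.or_none]
    apply pvFind_congr
    intro x hx
    rw [List.mem_range] at hx
    unfold pvPB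
    have hx' : ((x : Nat) : Int) + k ≤ (cs.length : Int) := by omega
    simp only [hx', true_and]
    by_cases h : PySem.Int.mod (pvW cs p k.toNat x) m = hv <;> simp [h]
  rw [hfind]
  unfold pvR
  rfl

theorem pvB_none (s : String) (p m k hv : Int) (hm : m ≠ 0) (hk : 1 ≤ k)
    (hkn : (s.toList.length : Int) < k) :
    subStrHash_alt s p m k hv = none := by
  rw [pvB_char s p m k hv hm hk]
  have : (List.range s.toList.length).find? (pvPB s.toList m k hv p k.toNat) = none := by
    rw [List.find?_eq_none]
    intro x hx
    rw [List.mem_range] at hx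
    unfold pvPB
    simp only [decide_eq_true_eq]
    intro hcon
    have := hcon.1
    omega
  rw [this]
  rfl

theorem pvW0_full (s : String) (p k : Int) (hkn : (s.toList.length : Int) < k) :
    pvW s.toList p k.toNat 0 = pvHash p s.toList := by
  unfold pvW
  rw [List.drop_zero, List.take_of_length_le (by omega)]

-- A on a too-short string: the single window checked is the whole string
theorem pvA_short (s : String) (p m k hv : Int) (hm : m ≠ 0) (hk : 1 ≤ k)
    (hp : p ≠ 0 ∨ (s.toList.length : Int) ≤ k) (hkn : (s.toList.length : Int) < k) :
    subStrHash s p m k hv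
      = (if PySem.Int.mod (pvHash p s.toList) m = hv then some (String.ofList s.toList) else none) := by
  rw [pvA_eq s p m k hv hm hk hp]
  unfold pvR
  have h2 : List.range ((s.toList.length - k.toNat) + 1) = [0] := by
    rw [show (s.toList.length - k.toNat) + 1 = 1 from by omega]
    decide
  rw [h2, List.find?_singleton, pvW0_full s p k hkn]
  by_cases h : PySem.Int.mod (pvHash p s.toList) m = hv
  · simp [h, List.take_of_length_le (show s.toList.length ≤ k.toNat by omega)]
  · simp [h]

-- ===== VERDICT (by name: the statement is the Claim_ definition above) =====
theorem subStrHash_spec : Claim_unchanged_subStrHash := by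
  intro s power modulo k hashValue _ hpre hnd
  obtain ⟨hm, hk, hp⟩ := hpre
  by_cases hkn : k ≤ (s.toList.length : Int)
  · rw [pvA_eq s power modulo k hashValue hm hk hp, pvB_eq s power modulo k hashValue hm hk hkn]
  · push Not at hkn
    rw [pvB_none s power modulo k hashValue hm hk hkn]
    rw [pvA_short s power modulo k hashValue hm hk hp hkn]
    have hne : ¬ PySem.Int.mod (pvHash power s.toList) modulo = hashValue := by
      intro hcon
      exact hnd ⟨hkn, by rw [pvDHash_eq]; exact hcon⟩
    rw [if_neg hne]

theorem subStrHash_changed : Claim_changed_subStrHash := by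
  unfold Claim_changed_subStrHash; decide

theorem subStrHash_tight : Claim_exact_subStrHash := by
  intro s power modulo k hashValue _ hpre hd
  obtain ⟨hm, hk, hp⟩ := hpre
  obtain ⟨hkn, hmatch⟩ := hd
  rw [pvB_none s power modulo k hashValue hm hk hkn]
  rw [pvA_short s power modulo k hashValue hm hk hp hkn]
  rw [pvDHash_eq] at hmatch
  rw [if_pos hmatch]
  simp
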